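-- pv_equiv track=rewrite | github.com/linhdvu14/cp-sols | sols/CodeForces/1795_edu/E_Explosions_.py | solve
-- ===== SOURCE A (Python) =====
-- def solve(N, A):
--     # L[i] = area under left downslope if peak is A[i]
--     L = [0] * (N + 1)
--     st = []
--     for i, a in enumerate(A):
--         # rightmost j s.t. A[j] <= A[i] - (i - j)
--         while st and st[-1][0] > a - i: st.pop()
--         j = st[-1][1] if st else -1
--         b = max(a - (i - j - 1), 0)
--         L[i] = (a + b) * (a - b + 1) // 2 + L[j]
--         st.append([a - i, i])
--
--     # R[i] = area under right downslope if peak is A[i]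
--     R = [0] * (N + 1)
--     st = []
--     for i in range(N - 1, -1, -1):
--         a = A[i]
--         # leftmost j s.t. A[j] <= A[i] - (j - i)
--         while st and st[-1][0] > a + i: st.pop()
--         j = st[-1][1] if st else N
--         b = max(0, a - (j - i - 1))
--         R[i] = (a + b) * (a - b + 1) // 2 + R[j]
--         st.append([a + i, i])
--
--     res = S = sum(A)
--     for i, a in enumerate(A):
--         save = L[i] + R[i] - a
--         res = min(res, S - save + a)
--
--     return res
-- ===== SOURCE B (Python) =====
-- def solve(N, A):
--     L = [0] * N
--     for i, a in enumerate(A):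
--         j = next((k for k in range(i - 1, -1, -1) if A[k] <= a - (i - k)), -1)
--         b = max(a - (i - j - 1), 0)
--         L[i] = (a + b) * (a - b + 1) // 2 + (L[j] if j >= 0 else 0)
--     R = [0] * N
--     for i in range(N - 1, -1, -1):
--         a = A[i]
--         j = next((k for k in range(i + 1, N) if A[k] <= a - (k - i)), N)
--         b = max(a - (j - i - 1), 0)
--         R[i] = (a + b) * (a - b + 1) // 2 + (R[j] if j < N else 0)
--     S = sum(A)
--     res = S
--     for a, l, r in zip(A, L, R):
--         res = min(res, S + 2 * a - l - r)
--     return res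
-- ===== Notes on version B (the rewrite author's own statement) =====
-- stated objective: alternative
-- what changed: Replaced A's two monotonic-stack passes by direct per-element linear scans (backward for L, forward for R) that find the nearest index with A[k]-k <= A[i]-i (resp. A[k]+k <= A[i]+i), and replaced the sentinel-wraparound reads L[-1]/R[N] by explicit 'if j in range else 0' plus a zip-based final pass.
-- outside the precondition, e.g. on solve(1, [27, -24]): A returns -321, B raises IndexError
import Mathlib
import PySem

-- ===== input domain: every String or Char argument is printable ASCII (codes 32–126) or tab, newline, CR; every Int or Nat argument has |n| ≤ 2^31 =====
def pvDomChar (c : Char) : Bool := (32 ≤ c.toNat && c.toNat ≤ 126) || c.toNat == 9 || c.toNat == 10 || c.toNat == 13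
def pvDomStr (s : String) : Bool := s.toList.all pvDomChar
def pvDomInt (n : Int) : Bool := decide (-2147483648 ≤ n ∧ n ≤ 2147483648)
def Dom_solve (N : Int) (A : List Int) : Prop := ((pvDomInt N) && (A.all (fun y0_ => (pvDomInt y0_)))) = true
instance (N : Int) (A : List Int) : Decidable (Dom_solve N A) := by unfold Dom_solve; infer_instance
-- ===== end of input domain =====

-- B replaces A's two monotonic-stack passes by direct nearest-qualifying-index scans (alternative
-- decomposition, O(N^2) instead of O(N)); return values proved equal whenever N = len(A).

-- ===== PORT A =====
-- loop body of A's first (left-area) pass, stack top at the head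
def solveStepL (s : List (Int × Int) × List Int) (ia : Int × Int) : List (Int × Int) × List Int :=
  let i := ia.1
  let a := ia.2
  let st := s.1.dropWhile (fun p => decide (p.1 > a - i))
  let j : Int := match st with | [] => -1 | p :: _ => p.2
  let b := max (a - (i - j - 1)) 0
  ((a - i, i) :: st,
    PySem.List.pySetD s.2 i
      (PySem.Int.floordiv ((a + b) * (a - b + 1)) 2 + PySem.List.pyGetD s.2 j 0))

-- loop body of A's second (right-area) pass
def solveStepR (N : Int) (A : List Int) (s : List (Int × Int) × List Int) (i : Int) :
    List (Int × Int) × List Int :=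
  let a := PySem.List.pyGetD A i 0
  let st := s.1.dropWhile (fun p => decide (p.1 > a + i))
  let j : Int := match st with | [] => N | p :: _ => p.2
  let b := max 0 (a - (j - i - 1))
  ((a + i, i) :: st,
    PySem.List.pySetD s.2 i
      (PySem.Int.floordiv ((a + b) * (a - b + 1)) 2 + PySem.List.pyGetD s.2 j 0))

def solve (N : Int) (A : List Int) : Int :=
  let p1 := (PySem.List.enumerate A 0).foldl solveStepL ([], List.replicate (N + 1).toNat 0)
  let p2 := (PySem.List.pyRange (N - 1) (-1) (-1)).foldl (solveStepR N A)
    ([], List.replicate (N + 1).toNat 0)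
  let S := A.sum
  (PySem.List.enumerate A 0).foldl (fun res ia =>
      let save := PySem.List.pyGetD p1.2 ia.1 0 + PySem.List.pyGetD p2.2 ia.1 0 - ia.2
      min res (S - save + ia.2)) S

-- ===== PORT B =====
-- loop body of B's left pass: backward linear scan for the nearest k with A[k] <= a - (i - k)
def solveAltStepL (A : List Int) (L : List Int) (ia : Int × Int) : List Int :=
  let i := ia.1
  let a := ia.2
  let j := ((PySem.List.pyRange (i - 1) (-1) (-1)).find?
    (fun k => decide (PySem.List.pyGetD A k 0 ≤ a - (i - k)))).getD (-1)
  let b := max (a - (i - j - 1)) 0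
  PySem.List.pySetD L i
    (PySem.Int.floordiv ((a + b) * (a - b + 1)) 2 +
      (if 0 ≤ j then PySem.List.pyGetD L j 0 else 0))

-- loop body of B's right pass: forward linear scan for the nearest k with A[k] <= a - (k - i)
def solveAltStepR (N : Int) (A : List Int) (R : List Int) (i : Int) : List Int :=
  let a := PySem.List.pyGetD A i 0
  let j := ((PySem.List.pyRange (i + 1) N 1).find?
    (fun k => decide (PySem.List.pyGetD A k 0 ≤ a - (k - i)))).getD N
  let b := max (a - (j - i - 1)) 0
  PySem.List.pySetD R i
    (PySem.Int.floordiv ((a + b) * (a - b + 1)) 2 +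
      (if j < N then PySem.List.pyGetD R j 0 else 0))

def solve_alt (N : Int) (A : List Int) : Int :=
  let L := (PySem.List.enumerate A 0).foldl (solveAltStepL A) (List.replicate N.toNat 0)
  let R := (PySem.List.pyRange (N - 1) (-1) (-1)).foldl (solveAltStepR N A) (List.replicate N.toNat 0)
  let S := A.sum
  (A.zip (L.zip R)).foldl (fun res alr => min res (S + 2 * alr.1 - alr.2.1 - alr.2.2)) S

-- ===== PRECONDITION & SPEC =====
-- Pre_ restricts to the natural domain N = len(A) (the problem's input contract), plus the trivial
-- N ≤ 0 with empty A where both loops run zero times. It excludes other mismatched N, on which A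
-- either raises an IndexError or returns a value produced accidentally by negative-index wraparound
-- into the sentinel cells.
def Pre_solve (N : Int) (A : List Int) : Prop := N = (A.length : Int) ∨ (N ≤ 0 ∧ A = [])
instance (N : Int) (A : List Int) : Decidable (Pre_solve N A) := by unfold Pre_solve; infer_instance
def pvWitness_solve : Int × List Int := (3, [1, 3, 2])

def Spec_solve (N : Int) (A : List Int) (out : Int) : Prop := out = solve_alt N A
instance (N : Int) (A : List Int) (out : Int) : Decidable (Spec_solve N A out) := by
  unfold Spec_solve; infer_instance

-- ===== CLAIM (what is proved, stated in full; the proofs are below) =====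
def Claim_equal_solve : Prop := ∀ (N : Int) (A : List Int),
  Dom_solve N A → Pre_solve N A → Spec_solve N A (solve N A)

-- ===== LEMMAS AND PROOFS =====

-- value of A at a Nat index (both programs only read indices 0..len-1 here)
def pvG (A : List Int) (k : Nat) : Int := A.getD k 0
-- left-pass weight: A[k] - k ; popping/selection compares only these
def pvWL (A : List Int) (k : Nat) : Int := pvG A k - (k : Int)
-- right-pass weight at processing step t (array index n-1-t): A[idx] + idx
def pvWR (A : List Int) (n : Nat) (t : Nat) : Int := pvG A (n - 1 - t) + ((n - 1 - t : Nat) : Int)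

-- largest k < m with p k (downward scan)
def pvRfind (p : Nat → Bool) (m : Nat) : Option Nat :=
  ((List.range m).map (fun k => m - 1 - k)).find? p

theorem pvRfind_zero (p : Nat → Bool) : pvRfind p 0 = none := rfl

theorem pvRfind_succ (p : Nat → Bool) (m : Nat) :
    pvRfind p (m + 1) = if p m then some m else pvRfind p m := by
  unfold pvRfind
  rw [List.range_succ_eq_map, List.map_cons, List.map_map]
  have h1 : ((fun k => m + 1 - 1 - k) ∘ Nat.succ) = (fun k => m - 1 - k) := by
    funext k; simp [Nat.succ_eq_add_one]; omega
  have h0 : m + 1 - 1 - 0 = m := by omega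
  rw [h1, h0, List.find?_cons]
  cases hp : p m <;> simp

theorem pvRfind_some (p : Nat → Bool) (m j : Nat) (h : pvRfind p m = some j) :
    j < m ∧ p j = true ∧ ∀ k, j < k → k < m → p k = false := by
  induction m with
  | zero => simp [pvRfind_zero] at h
  | succ m ih =>
    rw [pvRfind_succ] at h
    by_cases hp : p m = true
    · simp [hp] at h
      subst h
      exact ⟨Nat.lt_succ_self _, hp, fun k hk1 hk2 => by omega⟩
    · simp [hp] at h
      obtain ⟨h1, h2, h3⟩ := ih h
      refine ⟨by omega, h2, fun k hk1 hk2 => ?_⟩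
      by_cases hkm : k = m
      · subst hkm; simpa using hp
      · exact h3 k hk1 (by omega)

theorem pvRfind_none_iff (p : Nat → Bool) (m : Nat) :
    pvRfind p m = none ↔ ∀ k, k < m → p k = false := by
  induction m with
  | zero => simp [pvRfind_zero]
  | succ m ih =>
    rw [pvRfind_succ]
    by_cases hp : p m = true
    · rw [if_pos hp]
      constructor
      · intro h; simp at h
      · intro h; exact absurd (h m (Nat.lt_succ_self m)) (by simp [hp])
    · rw [if_neg hp, ih]
      constructor
      · intro h k hk
        by_cases hkm : k = m
        · subst hkm; simpa using hp
        · exact h k (by omega)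
      · intro h k hk; exact h k (by omega)

theorem pvRfind_skip (p : Nat → Bool) (m c : Nat) (hm : m ≤ c)
    (h : ∀ k, m ≤ k → k < c → p k = false) : pvRfind p c = pvRfind p m := by
  induction c with
  | zero => have : m = 0 := by omega
            subst this; rfl
  | succ c ih =>
    by_cases hmc : m = c + 1
    · subst hmc; rfl
    · rw [pvRfind_succ, h c (by omega) (by omega)]
      simp
      exact ih (by omega) (fun k hk1 hk2 => h k hk1 (by omega))

-- nearest previous index with weight ≤ current weight (what both programs select)
def pvPrev (w : Nat → Int) (t : Nat) : Option Nat := pvRfind (fun k => decide (w k ≤ w t)) t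

theorem pvPrev_lt (w : Nat → Int) (t j : Nat) (h : pvPrev w t = some j) : j < t :=
  (pvRfind_some _ _ _ h).1

-- the indices A's stack holds after pushing c, top first
def pvChain (w : Nat → Int) (c : Nat) : List Nat :=
  c :: (match h : pvPrev w c with
        | some j => pvChain w j
        | none => [])
termination_by c
decreasing_by exact pvPrev_lt w c j h

-- popping the chain lands exactly on the downward-scan answer
theorem pvChain_drop (w : Nat → Int) (x : Int) (c : Nat) :
    (pvChain w c).dropWhile (fun k => decide (x < w k)) =
      (match pvRfind (fun k => decide (w k ≤ x)) (c + 1) with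
       | some j => pvChain w j
       | none => []) := by
  induction c using Nat.strong_induction_on with
  | _ c ih =>
    rw [pvChain, pvRfind_succ]
    by_cases hc : w c ≤ x
    · simp only [List.dropWhile_cons, decide_eq_true_eq]
      rw [if_neg (by omega), if_pos (by simpa using hc)]
      rw [← pvChain]
    · simp only [List.dropWhile_cons, decide_eq_true_eq]
      rw [if_pos (by omega), if_neg (by simpa using hc)]
      cases hprev : pvPrev w c with
      | none =>
        have hnone : pvRfind (fun k => decide (w k ≤ x)) c = none := by
          rw [pvRfind_none_iff]
          intro k hk
          have := (pvRfind_none_iff _ _).mp hprev k hk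
          simp at this ⊢
          omega
        rw [hnone]
        rfl
      | some j =>
        have hj := pvPrev_lt w c j hprev
        have habove := (pvRfind_some _ _ _ hprev).2.2
        have hskip : pvRfind (fun k => decide (w k ≤ x)) c
            = pvRfind (fun k => decide (w k ≤ x)) (j + 1) := by
          apply pvRfind_skip _ _ _ (by omega)
          intro k hk1 hk2
          have := habove k (by omega) hk2
          simp at this ⊢
          omega
        rw [hskip]
        exact ih j hj

-- the generic stack state, top first (t = number of processed steps)
def pvStk (w : Nat → Int) (F : Nat → Int × Int) (t : Nat) : List (Int × Int) :=
  match t with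
  | 0 => []
  | Nat.succ s => (pvChain w s).map F

theorem pvStk_drop (w : Nat → Int) (F : Nat → Int × Int) (hF : ∀ k, (F k).1 = w k) (t : Nat) :
    (pvStk w F t).dropWhile (fun p => decide (w t < p.1))
      = (match pvPrev w t with | some j => (pvChain w j).map F | none => []) := by
  cases t with
  | zero =>
    have : pvPrev w 0 = none := pvRfind_zero _
    rw [this]
    rfl
  | succ s =>
    show ((pvChain w s).map F).dropWhile _ = _
    rw [List.dropWhile_map]
    have hcomp : ((fun p => decide (w (s+1) < p.1)) ∘ F) = (fun k => decide (w (s+1) < w k)) := by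
      funext k; simp [Function.comp, hF]
    rw [hcomp, pvChain_drop]
    have hpp : pvRfind (fun k => decide (w k ≤ w (s+1))) (s+1) = pvPrev w (s+1) := rfl
    rw [hpp]
    cases pvPrev w (s+1) <;> simp

def pvTri (a b : Int) : Int := PySem.Int.floordiv ((a + b) * (a - b + 1)) 2

-- left area if the peak is A[i]
def pvLF (A : List Int) (i : Nat) : Int :=
  match h : pvPrev (pvWL A) i with
  | none => pvTri (pvG A i) (max (pvG A i - ((i : Int) - (-1) - 1)) 0)
  | some j => pvTri (pvG A i) (max (pvG A i - ((i : Int) - (j : Int) - 1)) 0) + pvLF A j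
termination_by i
decreasing_by exact pvPrev_lt _ i j h

-- right area, indexed by processing step t (array index n-1-t)
def pvRF (A : List Int) (n : Nat) (t : Nat) : Int :=
  match h : pvPrev (pvWR A n) t with
  | none => pvTri (pvG A (n - 1 - t)) (max 0 (pvG A (n - 1 - t) - ((n : Int) - ((n - 1 - t : Nat) : Int) - 1)))
  | some t' => pvTri (pvG A (n - 1 - t))
      (max 0 (pvG A (n - 1 - t) - (((n - 1 - t' : Nat) : Int) - ((n - 1 - t : Nat) : Int) - 1)))
      + pvRF A n t'
termination_by t
decreasing_by exact pvPrev_lt _ t t' h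


theorem pvLF_none (A : List Int) (i : Nat) (h : pvPrev (pvWL A) i = none) :
    pvLF A i = pvTri (pvG A i) (max (pvG A i - ((i : Int) - (-1) - 1)) 0) := by
  rw [pvLF]
  split
  · rfl
  · next j' heq => rw [h] at heq; cases heq

theorem pvLF_some (A : List Int) (i j : Nat) (h : pvPrev (pvWL A) i = some j) :
    pvLF A i = pvTri (pvG A i) (max (pvG A i - ((i : Int) - (j : Int) - 1)) 0) + pvLF A j := by
  rw [pvLF]
  split
  · next heq => rw [h] at heq; cases heq
  · next j' heq => rw [h] at heq; injection heq with e; subst e; rfl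

theorem pvRF_none (A : List Int) (n t : Nat) (h : pvPrev (pvWR A n) t = none) :
    pvRF A n t = pvTri (pvG A (n - 1 - t))
      (max 0 (pvG A (n - 1 - t) - ((n : Int) - ((n - 1 - t : Nat) : Int) - 1))) := by
  rw [pvRF]
  split
  · rfl
  · next j' heq => rw [h] at heq; cases heq

theorem pvRF_some (A : List Int) (n t t' : Nat) (h : pvPrev (pvWR A n) t = some t') :
    pvRF A n t = pvTri (pvG A (n - 1 - t))
      (max 0 (pvG A (n - 1 - t) - (((n - 1 - t' : Nat) : Int) - ((n - 1 - t : Nat) : Int) - 1)))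
      + pvRF A n t' := by
  rw [pvRF]
  split
  · next heq => rw [h] at heq; cases heq
  · next j' heq => rw [h] at heq; injection heq with e; subst e; rfl

theorem pvFind?_congr {α : Type} (l : List α) (p q : α → Bool) (h : ∀ x ∈ l, p x = q x) :
    l.find? p = l.find? q := by
  induction l with
  | nil => rfl
  | cons x xs ih =>
    rw [List.find?_cons, List.find?_cons, h x (by simp)]
    cases q x
    · exact ih (fun y hy => h y (by simp [hy]))
    · rfl

theorem pvSet_map_range (f : Nat → Int) (m t : Nat) (v : Int) (ht : t < m) :
    ((List.range m).map f).set t v = (List.range m).map (fun i => if i = t then v else f i) := by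
  apply List.ext_getElem
  · simp
  · intro i h1 h2
    simp only [List.getElem_set, List.getElem_map, List.getElem_range]
    simp at h1
    by_cases hit : t = i <;> simp [hit]
    omega

theorem pvRepl_eq (m : Nat) : List.replicate m (0:Int) = (List.range m).map (fun _ => 0) := by
  rw [List.map_const']
  simp

theorem pvA_L (A : List Int) (t : Nat) (ht : t ≤ A.length) :
    (List.range t).foldl (fun s (k : Nat) => solveStepL s ((k : Int), pvG A k))
      ([], List.replicate (A.length + 1) (0:Int))
    = (pvStk (pvWL A) (fun k => (pvWL A k, (k : Int))) t,
       (List.range (A.length + 1)).map (fun i => if i < t then pvLF A i else 0)) := by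
  induction t with
  | zero =>
    refine Prod.ext rfl ?_
    show List.replicate (A.length + 1) (0:Int) = _
    rw [pvRepl_eq]
    apply List.map_congr_left
    intro i hi
    simp
  | succ t ih =>
    have htn : t < A.length := by omega
    rw [List.range_succ, List.foldl_append, ih (by omega), List.foldl_cons, List.foldl_nil]
    simp only [solveStepL]
    have epred : (fun p : Int × Int => decide (pvG A t - (t : Int) < p.1))
        = (fun p : Int × Int => decide (pvWL A t < p.1)) := rfl
    rw [epred, pvStk_drop (pvWL A) (fun k => (pvWL A k, (k : Int))) (fun k => rfl) t]
    cases hprev : pvPrev (pvWL A) t with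
    | none =>
      dsimp only
      have hv : PySem.List.pyGetD
          ((List.range (A.length + 1)).map (fun i => if i < t then pvLF A i else 0)) (-1) 0 = 0 := by
        have hne : ((List.range (A.length + 1)).map (fun i => if i < t then pvLF A i else 0)) ≠ [] := by
          simp
        rw [PySem.List.pyGetD_neg_one _ _ hne, List.getLast_eq_getElem]
        simp
        omega
      refine Prod.ext ?_ ?_
      · show _ = pvStk (pvWL A) _ (t + 1)
        show ((pvG A t - (t:Int), (t:Int)) :: []) = _
        rw [pvStk]
        rw [pvChain, hprev]
        rfl
      · show PySem.List.pySetD _ ((t:Nat) : Int) _ = _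
        rw [PySem.List.pySetD_natCast, hv]
        rw [pvSet_map_range _ _ _ _ (by omega)]
        apply List.map_congr_left
        intro i hi
        simp only [List.mem_range] at hi
        by_cases h1 : i = t
        · subst h1
          rw [if_pos rfl, if_pos (by omega)]
          rw [pvLF_none A i hprev]
          simp [pvTri]
        · rw [if_neg h1]
          by_cases h3 : i < t
          · rw [if_pos h3, if_pos (by omega)]
          · rw [if_neg h3, if_neg (by omega)]
    | some j =>
      dsimp only
      have hjt : j < t := pvPrev_lt _ _ _ hprev
      have hchain : (pvChain (pvWL A) j).map (fun k => (pvWL A k, (k : Int)))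
          = (pvWL A j, (j : Int)) :: ((match h : pvPrev (pvWL A) j with
              | some j2 => pvChain (pvWL A) j2 | none => []).map (fun k => (pvWL A k, (k : Int)))) := by
        rw [pvChain]
        rfl
      rw [hchain]
      have hv : PySem.List.pyGetD
          ((List.range (A.length + 1)).map (fun i => if i < t then pvLF A i else 0)) ((j:Nat) : Int) 0
          = pvLF A j := by
        rw [PySem.List.pyGetD_natCast, PySem.List.getD_map_range _ _ _ _ (by omega)]
        rw [if_pos hjt]
      refine Prod.ext ?_ ?_
      · show ((pvG A t - (t:Int), (t:Int)) :: _) = pvStk (pvWL A) _ (t + 1)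
        rw [pvStk, pvChain, hprev, ← hchain]
        rfl
      · show PySem.List.pySetD _ ((t:Nat) : Int) _ = _
        rw [PySem.List.pySetD_natCast, hv]
        rw [pvSet_map_range _ _ _ _ (by omega)]
        apply List.map_congr_left
        intro i hi
        simp only [List.mem_range] at hi
        by_cases h1 : i = t
        · subst h1
          rw [if_pos rfl, if_pos (by omega)]
          rw [pvLF_some A i j hprev]
          simp [pvTri]
        · rw [if_neg h1]
          by_cases h3 : i < t
          · rw [if_pos h3, if_pos (by omega)]
          · rw [if_neg h3, if_neg (by omega)]

-- B's backward scan selects the same index as A's stack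
theorem pvB_jL (A : List Int) (t : Nat) (htn : t < A.length) :
    ((PySem.List.pyRange ((t : Int) - 1) (-1) (-1)).find?
      (fun k => decide (PySem.List.pyGetD A k 0 ≤ pvG A t - ((t : Int) - k)))).getD (-1)
    = (match pvPrev (pvWL A) t with | some j => (j : Int) | none => -1) := by
  rw [PySem.List.pyRange_neg_one]
  have hcnt : (((t : Int) - 1) - (-1)).toNat = t := by omega
  rw [hcnt, List.find?_map]
  have hprevEq : pvPrev (pvWL A) t = ((List.range t).find?
      ((fun k => decide (pvWL A k ≤ pvWL A t)) ∘ (fun m => t - 1 - m))).map (fun m => t - 1 - m) := by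
    rw [pvPrev, pvRfind, List.find?_map]
  rw [hprevEq]
  have hq : ∀ m ∈ List.range t,
      ((fun k => decide (PySem.List.pyGetD A k 0 ≤ pvG A t - ((t : Int) - k))) ∘ (fun k : Nat => (t : Int) - 1 - (k : Int))) m
      = ((fun k => decide (pvWL A k ≤ pvWL A t)) ∘ (fun m => t - 1 - m)) m := by
    intro m hm
    simp only [List.mem_range] at hm
    simp only [Function.comp]
    have he : ((t : Int) - 1 - (m : Int)) = ((t - 1 - m : Nat) : Int) := by omega
    simp only [he, PySem.List.pyGetD_natCast, pvWL, pvG, decide_eq_decide]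
    omega
  rw [pvFind?_congr _ _ _ hq]
  cases hfind : (List.range t).find? ((fun k => decide (pvWL A k ≤ pvWL A t)) ∘ (fun m => t - 1 - m)) with
  | none => rfl
  | some m =>
    have hm : m < t := by
      have := List.mem_range.mp (List.mem_of_find?_eq_some hfind)
      exact this
    simp only [Option.map_some, Option.getD_some]
    clear hcnt hprevEq hq hfind
    have h2 : t - 1 - m = t - (m + 1) := by omega
    rw [h2, Nat.cast_sub (by omega : m + 1 ≤ t)]
    push_cast
    ring

theorem pvB_L (A : List Int) (t : Nat) (ht : t ≤ A.length) :
    (List.range t).foldl (fun L (k : Nat) => solveAltStepL A L ((k : Int), pvG A k))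
      (List.replicate A.length (0:Int))
    = (List.range A.length).map (fun i => if i < t then pvLF A i else 0) := by
  induction t with
  | zero =>
    rw [pvRepl_eq]
    apply List.map_congr_left
    intro i hi
    simp
  | succ t ih =>
    have htn : t < A.length := by omega
    rw [List.range_succ, List.foldl_append, ih (by omega), List.foldl_cons, List.foldl_nil]
    simp only [solveAltStepL]
    rw [pvB_jL A t htn]
    cases hprev : pvPrev (pvWL A) t with
    | none =>
      dsimp only
      rw [if_neg (by omega)]
      rw [PySem.List.pySetD_natCast, pvSet_map_range _ _ _ _ (by omega)]
      apply List.map_congr_left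
      intro i hi
      simp only [List.mem_range] at hi
      by_cases h1 : i = t
      · subst h1
        rw [if_pos rfl, if_pos (by omega), pvLF_none A i hprev]
        simp [pvTri]
      · rw [if_neg h1]
        by_cases h3 : i < t
        · rw [if_pos h3, if_pos (by omega)]
        · rw [if_neg h3, if_neg (by omega)]
    | some j =>
      dsimp only
      have hjt : j < t := pvPrev_lt _ _ _ hprev
      rw [if_pos (by omega)]
      rw [PySem.List.pyGetD_natCast, PySem.List.getD_map_range _ _ _ _ (by omega), if_pos hjt]
      rw [PySem.List.pySetD_natCast, pvSet_map_range _ _ _ _ (by omega)]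
      apply List.map_congr_left
      intro i hi
      simp only [List.mem_range] at hi
      by_cases h1 : i = t
      · subst h1
        rw [if_pos rfl, if_pos (by omega), pvLF_some A i j hprev]
        rfl
      · rw [if_neg h1]
        by_cases h3 : i < t
        · rw [if_pos h3, if_pos (by omega)]
        · rw [if_neg h3, if_neg (by omega)]

theorem pvA_R (A : List Int) (t : Nat) (ht : t ≤ A.length) :
    (List.range t).foldl (fun s (k : Nat) => solveStepR (A.length : Int) A s ((A.length : Int) - 1 - (k : Int)))
      ([], List.replicate (A.length + 1) (0:Int))
    = (pvStk (pvWR A A.length) (fun k => (pvWR A A.length k, ((A.length - 1 - k : Nat) : Int))) t,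
       (List.range (A.length + 1)).map
         (fun i => if A.length - t ≤ i ∧ i < A.length then pvRF A A.length (A.length - 1 - i) else 0)) := by
  induction t with
  | zero =>
    refine Prod.ext rfl ?_
    show List.replicate (A.length + 1) (0:Int) = _
    rw [pvRepl_eq]
    apply List.map_congr_left
    intro i hi
    simp only [List.mem_range] at hi
    rw [if_neg (by omega)]
  | succ t ih =>
    have htn : t < A.length := by omega
    rw [List.range_succ, List.foldl_append, ih (by omega), List.foldl_cons, List.foldl_nil]
    simp only [solveStepR]
    have hi : ((A.length : Int) - 1 - (t : Int)) = ((A.length - 1 - t : Nat) : Int) := by omega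
    simp only [hi, PySem.List.pyGetD_natCast]
    have hg : A.getD (A.length - 1 - t) 0 = pvG A (A.length - 1 - t) := rfl
    simp only [hg]
    have epred : (fun p : Int × Int => decide (pvG A (A.length - 1 - t) + ((A.length - 1 - t : Nat) : Int) < p.1))
        = (fun p : Int × Int => decide (pvWR A A.length t < p.1)) := rfl
    rw [epred,
      pvStk_drop (pvWR A A.length) (fun k => (pvWR A A.length k, ((A.length - 1 - k : Nat) : Int))) (fun k => rfl) t]
    cases hprev : pvPrev (pvWR A A.length) t with
    | none =>
      dsimp only
      have hv : PySem.List.pyGetD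
          ((List.range (A.length + 1)).map
            (fun i => if A.length - t ≤ i ∧ i < A.length then pvRF A A.length (A.length - 1 - i) else 0))
          ((A.length : Int)) 0 = 0 := by
        have := PySem.List.pyGetD_natCast
          ((List.range (A.length + 1)).map
            (fun i => if A.length - t ≤ i ∧ i < A.length then pvRF A A.length (A.length - 1 - i) else 0))
          A.length (0:Int)
        rw [this, PySem.List.getD_map_range _ _ _ _ (by omega), if_neg (by omega)]
      rw [hv]
      refine Prod.ext ?_ ?_
      · show _ = pvStk (pvWR A A.length) _ (t + 1)
        rw [pvStk, pvChain, hprev]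
        rfl
      · rw [PySem.List.pySetD_natCast, pvSet_map_range _ _ _ _ (by omega)]
        apply List.map_congr_left
        intro i hi2
        simp only [List.mem_range] at hi2
        by_cases h1 : i = A.length - 1 - t
        · subst h1
          rw [if_pos rfl, if_pos (by omega)]
          have hb : A.length - 1 - (A.length - 1 - t) = t := by omega
          rw [hb, pvRF_none A A.length t hprev]
          simp [pvTri]
        · rw [if_neg h1]
          by_cases h3 : A.length - t ≤ i ∧ i < A.length
          · rw [if_pos h3, if_pos (by omega)]
          · rw [if_neg h3, if_neg (by omega)]
    | some j =>
      dsimp only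
      have hjt : j < t := pvPrev_lt _ _ _ hprev
      have hchain : (pvChain (pvWR A A.length) j).map
            (fun k => (pvWR A A.length k, ((A.length - 1 - k : Nat) : Int)))
          = (pvWR A A.length j, ((A.length - 1 - j : Nat) : Int)) ::
            ((match h : pvPrev (pvWR A A.length) j with
              | some j2 => pvChain (pvWR A A.length) j2 | none => []).map
              (fun k => (pvWR A A.length k, ((A.length - 1 - k : Nat) : Int)))) := by
        rw [pvChain]
        rfl
      rw [hchain]
      have hv : PySem.List.pyGetD
          ((List.range (A.length + 1)).map
            (fun i => if A.length - t ≤ i ∧ i < A.length then pvRF A A.length (A.length - 1 - i) else 0))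
          ((A.length - 1 - j : Nat) : Int) 0 = pvRF A A.length j := by
        rw [PySem.List.pyGetD_natCast, PySem.List.getD_map_range _ _ _ _ (by omega), if_pos (by omega)]
        have hb : A.length - 1 - (A.length - 1 - j) = j := by omega
        rw [hb]
      rw [hv]
      refine Prod.ext ?_ ?_
      · show _ = pvStk (pvWR A A.length) _ (t + 1)
        rw [pvStk, pvChain, hprev, ← hchain]
        rfl
      · rw [PySem.List.pySetD_natCast, pvSet_map_range _ _ _ _ (by omega)]
        apply List.map_congr_left
        intro i hi2
        simp only [List.mem_range] at hi2
        by_cases h1 : i = A.length - 1 - t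
        · subst h1
          rw [if_pos rfl, if_pos (by omega)]
          have hb : A.length - 1 - (A.length - 1 - t) = t := by omega
          rw [hb, pvRF_some A A.length t j hprev]
          rfl
        · rw [if_neg h1]
          by_cases h3 : A.length - t ≤ i ∧ i < A.length
          · rw [if_pos h3, if_pos (by omega)]
          · rw [if_neg h3, if_neg (by omega)]

-- B's forward scan selects the same index as A's stack
theorem pvB_jR (A : List Int) (t : Nat) (htn : t < A.length) :
    ((PySem.List.pyRange (((A.length - 1 - t : Nat) : Int) + 1) ((A.length : Int)) 1).find?
      (fun k => decide (PySem.List.pyGetD A k 0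
        ≤ pvG A (A.length - 1 - t) - (k - ((A.length - 1 - t : Nat) : Int))))).getD ((A.length : Int))
    = (match pvPrev (pvWR A A.length) t with
       | some t' => ((A.length - 1 - t' : Nat) : Int) | none => (A.length : Int)) := by
  rw [PySem.List.pyRange_one]
  have hcnt : ((A.length : Int) - (((A.length - 1 - t : Nat) : Int) + 1)).toNat = t := by omega
  rw [hcnt, List.find?_map]
  have hprevEq : pvPrev (pvWR A A.length) t = ((List.range t).find?
      ((fun k => decide (pvWR A A.length k ≤ pvWR A A.length t)) ∘ (fun m => t - 1 - m))).map
      (fun m => t - 1 - m) := by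
    rw [pvPrev, pvRfind, List.find?_map]
  rw [hprevEq]
  have hq : ∀ m ∈ List.range t,
      ((fun k => decide (PySem.List.pyGetD A k 0
          ≤ pvG A (A.length - 1 - t) - (k - ((A.length - 1 - t : Nat) : Int))))
        ∘ (fun k : Nat => ((A.length - 1 - t : Nat) : Int) + 1 + (k : Int))) m
      = ((fun k => decide (pvWR A A.length k ≤ pvWR A A.length t)) ∘ (fun m => t - 1 - m)) m := by
    intro m hm
    simp only [List.mem_range] at hm
    simp only [Function.comp]
    have he : (((A.length - 1 - t : Nat) : Int) + 1 + (m : Int)) = ((A.length - t + m : Nat) : Int) := by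
      omega
    have hidx : A.length - 1 - (t - 1 - m) = A.length - t + m := by omega
    simp only [he, hidx, PySem.List.pyGetD_natCast, pvWR, pvG, decide_eq_decide]
    omega
  rw [pvFind?_congr _ _ _ hq]
  cases hfind : (List.range t).find?
      ((fun k => decide (pvWR A A.length k ≤ pvWR A A.length t)) ∘ (fun m => t - 1 - m)) with
  | none => rfl
  | some m =>
    have hm : m < t := List.mem_range.mp (List.mem_of_find?_eq_some hfind)
    simp only [Option.map_some, Option.getD_some]
    clear hcnt hprevEq hq hfind
    have e1 : A.length - 1 - (t - 1 - m) = (A.length - 1 - t) + (m + 1) := by omega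
    rw [e1, Nat.cast_add]
    push_cast
    ring

theorem pvB_R (A : List Int) (t : Nat) (ht : t ≤ A.length) :
    (List.range t).foldl (fun R (k : Nat) => solveAltStepR (A.length : Int) A R ((A.length : Int) - 1 - (k : Int)))
      (List.replicate A.length (0:Int))
    = (List.range A.length).map
        (fun i => if A.length - t ≤ i ∧ i < A.length then pvRF A A.length (A.length - 1 - i) else 0) := by
  induction t with
  | zero =>
    rw [pvRepl_eq]
    apply List.map_congr_left
    intro i hi
    simp only [List.mem_range] at hi
    rw [if_neg (by omega)]
  | succ t ih =>
    have htn : t < A.length := by omega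
    rw [List.range_succ, List.foldl_append, ih (by omega), List.foldl_cons, List.foldl_nil]
    simp only [solveAltStepR]
    have hi : ((A.length : Int) - 1 - (t : Int)) = ((A.length - 1 - t : Nat) : Int) := by omega
    simp only [hi, PySem.List.pyGetD_natCast]
    have hg : A.getD (A.length - 1 - t) 0 = pvG A (A.length - 1 - t) := rfl
    simp only [hg]
    rw [pvB_jR A t htn]
    cases hprev : pvPrev (pvWR A A.length) t with
    | none =>
      dsimp only
      rw [if_neg (by omega)]
      rw [PySem.List.pySetD_natCast, pvSet_map_range _ _ _ _ (by omega)]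
      apply List.map_congr_left
      intro i hi2
      simp only [List.mem_range] at hi2
      by_cases h1 : i = A.length - 1 - t
      · subst h1
        rw [if_pos rfl, if_pos (by omega)]
        have hb : A.length - 1 - (A.length - 1 - t) = t := by omega
        rw [hb, pvRF_none A A.length t hprev]
        rw [max_comm]
        simp [pvTri]
      · rw [if_neg h1]
        by_cases h3 : A.length - t ≤ i ∧ i < A.length
        · rw [if_pos h3, if_pos (by omega)]
        · rw [if_neg h3, if_neg (by omega)]
    | some j =>
      dsimp only
      have hjt : j < t := pvPrev_lt _ _ _ hprev
      have hq1 : ((A.length - 1 - j : Nat) : Int) < (A.length : Int) := by omega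
      rw [if_pos hq1]
      have hq2 : A.length - 1 - j < A.length := by omega
      have hq3 : A.length - t ≤ A.length - 1 - j ∧ A.length - 1 - j < A.length := by omega
      rw [PySem.List.pyGetD_natCast, PySem.List.getD_map_range _ _ _ _ hq2, if_pos hq3]
      have hb1 : A.length - 1 - (A.length - 1 - j) = j := by omega
      rw [hb1]
      rw [PySem.List.pySetD_natCast, pvSet_map_range _ _ _ _ (by omega)]
      apply List.map_congr_left
      intro i hi2
      simp only [List.mem_range] at hi2
      by_cases h1 : i = A.length - 1 - t
      · subst h1
        rw [if_pos rfl, if_pos (by omega)]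
        have hb : A.length - 1 - (A.length - 1 - t) = t := by omega
        rw [hb, pvRF_some A A.length t j hprev]
        rw [max_comm]
        rfl
      · rw [if_neg h1]
        by_cases h3 : A.length - t ≤ i ∧ i < A.length
        · rw [if_pos h3, if_pos (by omega)]
        · rw [if_neg h3, if_neg (by omega)]

theorem pvA_solve (A : List Int) :
    solve (A.length : Int) A
    = (List.range A.length).foldl
        (fun res k => min res (A.sum + 2 * pvG A k - pvLF A k
          - pvRF A A.length (A.length - 1 - k))) A.sum := by
  simp only [solve]
  rw [PySem.List.enumerate_eq_map_pyRange A 0, PySem.List.len_eq, PySem.List.pyRange_one,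
    PySem.List.pyRange_neg_one]
  have hc1 : (((A.length : Int)) - 0).toNat = A.length := by omega
  have hc2 : (((A.length : Int)) - 1 - -1).toNat = A.length := by omega
  have hc3 : (((A.length : Int)) + 1).toNat = A.length + 1 := by omega
  rw [hc1, hc2, hc3]
  simp only [List.map_map, List.foldl_map]
  have e1 : ∀ (acc : List (Int × Int) × List Int), ∀ k ∈ List.range A.length,
      solveStepL acc (((fun j => (j, PySem.List.pyGetD A j 0)) ∘ (fun k : Nat => (0 : Int) + (k : Int))) k)
      = solveStepL acc ((k : Int), pvG A k) := by
    intro acc k hk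
    simp only [Function.comp, zero_add, PySem.List.pyGetD_natCast]
    rfl
  rw [PySem.List.foldl_congr_mem _ _ _ _ e1, pvA_L A A.length le_rfl,
    pvA_R A A.length le_rfl]
  have e2 : ∀ (acc : Int), ∀ k ∈ List.range A.length,
      min acc (A.sum -
        (PySem.List.pyGetD (pvStk (pvWL A) (fun k => (pvWL A k, (k : Int))) A.length,
            (List.range (A.length + 1)).map (fun i => if i < A.length then pvLF A i else 0)).2
            (((fun j => (j, PySem.List.pyGetD A j 0)) ∘ (fun k : Nat => (0 : Int) + (k : Int))) k).1 0
          + PySem.List.pyGetD (pvStk (pvWR A A.length)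
              (fun k => (pvWR A A.length k, ((A.length - 1 - k : Nat) : Int))) A.length,
            (List.range (A.length + 1)).map
              (fun i => if A.length - A.length ≤ i ∧ i < A.length
                then pvRF A A.length (A.length - 1 - i) else 0)).2
            (((fun j => (j, PySem.List.pyGetD A j 0)) ∘ (fun k : Nat => (0 : Int) + (k : Int))) k).1 0
          - (((fun j => (j, PySem.List.pyGetD A j 0)) ∘ (fun k : Nat => (0 : Int) + (k : Int))) k).2)
        + (((fun j => (j, PySem.List.pyGetD A j 0)) ∘ (fun k : Nat => (0 : Int) + (k : Int))) k).2)
      = min acc (A.sum + 2 * pvG A k - pvLF A k - pvRF A A.length (A.length - 1 - k)) := by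
    intro acc k hk
    simp only [List.mem_range] at hk
    simp only [Function.comp, zero_add, PySem.List.pyGetD_natCast]
    rw [PySem.List.getD_map_range _ _ _ _ (by omega), PySem.List.getD_map_range _ _ _ _ (by omega),
      if_pos hk, if_pos (by omega)]
    have hg : A.getD k 0 = pvG A k := rfl
    rw [hg]
    exact congrArg (min acc) (by omega)
  rw [PySem.List.foldl_congr_mem _ _ _ _ e2]

theorem pvB_solve (A : List Int) :
    solve_alt (A.length : Int) A
    = (List.range A.length).foldl
        (fun res k => min res (A.sum + 2 * pvG A k - pvLF A k
          - pvRF A A.length (A.length - 1 - k))) A.sum := by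
  simp only [solve_alt]
  rw [PySem.List.enumerate_eq_map_pyRange A 0, PySem.List.len_eq, PySem.List.pyRange_one,
    PySem.List.pyRange_neg_one]
  have hc1 : (((A.length : Int)) - 0).toNat = A.length := by omega
  have hc2 : (((A.length : Int)) - 1 - -1).toNat = A.length := by omega
  have hc3 : ((A.length : Int)).toNat = A.length := by omega
  rw [hc1, hc2, hc3]
  simp only [List.map_map, List.foldl_map]
  have e1 : ∀ (acc : List Int), ∀ k ∈ List.range A.length,
      solveAltStepL A acc (((fun j => (j, PySem.List.pyGetD A j 0)) ∘ (fun k : Nat => (0 : Int) + (k : Int))) k)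
      = solveAltStepL A acc ((k : Int), pvG A k) := by
    intro acc k hk
    simp only [Function.comp, zero_add, PySem.List.pyGetD_natCast]
    rfl
  rw [PySem.List.foldl_congr_mem _ _ _ _ e1, pvB_L A A.length le_rfl, pvB_R A A.length le_rfl]
  have hzip : A.zip
        (((List.range A.length).map (fun i => if i < A.length then pvLF A i else 0)).zip
          ((List.range A.length).map
            (fun i => if A.length - A.length ≤ i ∧ i < A.length
              then pvRF A A.length (A.length - 1 - i) else 0)))
      = (List.range A.length).map
          (fun k => (pvG A k, (pvLF A k, pvRF A A.length (A.length - 1 - k)))) := by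
    apply List.ext_getElem
    · simp
    · intro k h1 h2
      have hk : k < A.length := by
        simpa using h2
      simp only [List.getElem_zip, List.getElem_map, List.getElem_range]
      rw [if_pos hk, if_pos (by omega)]
      have hg : A[k] = pvG A k := (List.getD_eq_getElem A 0 (by omega)).symm
      rw [hg]
  rw [hzip, List.foldl_map]

-- ===== VERDICT (by name: the statement is the Claim_ definition above) =====
theorem solve_spec : Claim_equal_solve := by
  unfold Claim_equal_solve
  intro N A hdom hpre
  unfold Spec_solve
  unfold Pre_solve at hpre
  rcases hpre with hpre | ⟨hN, hA⟩
  · subst hpre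
    rw [pvA_solve, pvB_solve]
  · subst hA
    have hr : PySem.List.pyRange (N - 1) (-1) (-1) = [] :=
      PySem.List.pyRange_neg_one_eq_nil (by omega)
    simp [solve, solve_alt, hr, PySem.List.enumerate]
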